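-- pv_equiv track=rewrite | github.com/Wang-sx0103/NumericalCalculation | lib/Init.py | UMat
-- ===== SOURCE A (Python) =====
-- def UMat(AMat: list) -> list:
--     size = len(AMat)
--     mat = [[0] * size for _ in range(size)]
--     for i in range(size):
--         for j in range(size):
--             if j == i + 1:
--                 mat[i][j] = AMat[i][j]
--                 continue
--         if i == size - 1:
--             break
--     return mat
-- ===== SOURCE B (Python) =====
-- def UMat(AMat: list) -> list:
--     n = len(AMat)
--     rows = []
--     for i in range(n):
--         if i + 1 < n:
--             rows.append([0] * (i + 1) + [AMat[i][i + 1]] + [0] * (n - i - 2))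
--         else:
--             rows.append([0] * n)
--     return rows
-- ===== Notes on version B (the rewrite author's own statement) =====
-- stated objective: simpler
-- what changed: B builds each output row directly by concatenation (zeros, the one superdiagonal entry, zeros) in a single pass over rows, instead of A's nested loop that scans every cell of a mutable zero matrix testing j == i+1.
import Mathlib
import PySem

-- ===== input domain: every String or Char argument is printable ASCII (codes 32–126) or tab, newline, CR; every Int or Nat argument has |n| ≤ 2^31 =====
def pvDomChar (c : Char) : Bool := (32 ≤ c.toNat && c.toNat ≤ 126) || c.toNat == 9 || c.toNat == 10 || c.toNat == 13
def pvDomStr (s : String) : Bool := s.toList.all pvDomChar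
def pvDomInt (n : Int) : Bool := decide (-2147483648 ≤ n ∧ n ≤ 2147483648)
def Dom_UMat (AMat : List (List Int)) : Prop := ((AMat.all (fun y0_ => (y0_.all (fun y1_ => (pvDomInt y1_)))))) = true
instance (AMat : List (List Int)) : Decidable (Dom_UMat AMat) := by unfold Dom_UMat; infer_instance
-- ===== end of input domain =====

-- B replaces A's nested cell-by-cell scan of a mutable zero matrix by direct per-row
-- construction (zeros ++ superdiagonal entry ++ zeros); objective: simpler, same cost.

-- ===== PORT A =====
-- Transliteration of A: build an n×n zero matrix, then nested loops over i,j setting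
-- mat[i][j] := AMat[i][j] when j = i+1 (the `continue` and the final `break` do not
-- affect the result; out-of-range AMat[i][j] — Python IndexError — is excluded by Pre_,
-- getD's default is never reached inside Pre_).
-- (size = len(AMat) is written inline as AMat.length)
def UMat (AMat : List (List Int)) : List (List Int) :=
  (List.range AMat.length).foldl (fun mat i =>
    (List.range AMat.length).foldl (fun mat j =>
      if j = i + 1 then
        mat.set i ((mat.getD i []).set j ((AMat.getD i []).getD j 0))
      else mat) mat) ((List.range AMat.length).map (fun _ => List.replicate AMat.length (0 : Int)))

-- ===== PORT B =====
-- Transliteration of Source B: single loop over row indices, appending each fully built row.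
def UMat_alt (AMat : List (List Int)) : List (List Int) :=
  (List.range AMat.length).foldl (fun rows i =>
    rows ++ [if i + 1 < AMat.length then
               List.replicate (i + 1) (0 : Int)
                 ++ [(AMat.getD i []).getD (i + 1) 0]
                 ++ List.replicate (AMat.length - i - 2) 0
             else List.replicate AMat.length 0]) []

-- ===== PRECONDITION & SPEC =====
-- Pre_ excludes exactly the inputs where the Python A raises IndexError reading
-- AMat[i][i+1] (a row i < n-1 shorter than i+2); B raises there too.
def Pre_UMat (AMat : List (List Int)) : Prop :=
  ∀ i : ℕ, i + 1 < AMat.length → i + 1 < (AMat.getD i []).length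
instance (AMat : List (List Int)) : Decidable (Pre_UMat AMat) := by
  unfold Pre_UMat
  exact decidable_of_iff (∀ i < AMat.length, i + 1 < AMat.length → i + 1 < (AMat.getD i []).length)
    ⟨fun h i hi => h i (by omega) hi, fun h i _ hi => h i hi⟩
def pvWitness_UMat : List (List Int) := [[1, 2, 3], [4, 5, 6], [7, 8, 9]]

def Spec_UMat (AMat : List (List Int)) (out : List (List Int)) : Prop := out = UMat_alt AMat
instance (AMat : List (List Int)) (out : List (List Int)) : Decidable (Spec_UMat AMat out) := by unfold Spec_UMat; infer_instance

-- ===== CLAIM (what is proved, stated in full; the proofs are below) =====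
def Claim_equal_UMat : Prop := ∀ (AMat : List (List Int)), Dom_UMat AMat → Pre_UMat AMat → Spec_UMat AMat (UMat AMat)

-- ===== LEMMAS AND PROOFS =====

-- The superdiagonal entry of row i (shared abbreviation for the proofs).
def pvA (AMat : List (List Int)) (i : ℕ) : Int := (AMat.getD i []).getD (i + 1) 0

-- A fold that applies f only at index k is f (applied once) when k occurs once.
theorem pv_foldl_point {α : Type} (f : α → α) (k : ℕ) :
    ∀ (l : List ℕ), l.Nodup → ∀ a : α,
      l.foldl (fun m j => if j = k then f m else m) a = if k ∈ l then f a else a := by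
  intro l hl
  induction l with
  | nil => intro a; simp
  | cons x t ih =>
    intro a
    rcases List.nodup_cons.mp hl with ⟨hx, ht⟩
    by_cases hxk : x = k
    · subst hxk
      simp only [List.foldl_cons, ih ht]
      simp [hx]
    · simp only [List.foldl_cons, if_neg hxk, ih ht]
      simp [List.mem_cons, Ne.symm hxk]

-- The single row update performed for index i (when i+1 < n).
def pvF (AMat : List (List Int)) (mat : List (List Int)) (i : ℕ) : List (List Int) :=
  if i + 1 < AMat.length then
    mat.set i ((mat.getD i []).set (i + 1) (pvA AMat i))
  else mat

theorem pv_inner_fold (AMat : List (List Int)) (mat : List (List Int)) (i : ℕ) :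
    (List.range AMat.length).foldl (fun mat j =>
      if j = i + 1 then
        mat.set i ((mat.getD i []).set j ((AMat.getD i []).getD j 0))
      else mat) mat = pvF AMat mat i := by
  have h := pv_foldl_point
    (fun m : List (List Int) => m.set i ((m.getD i []).set (i + 1) (pvA AMat i)))
    (i + 1) (List.range AMat.length) (List.nodup_range) mat
  have hfun : (fun (m : List (List Int)) (j : ℕ) =>
      if j = i + 1 then m.set i ((m.getD i []).set j ((AMat.getD i []).getD j 0)) else m)
      = (fun (m : List (List Int)) (j : ℕ) =>
      if j = i + 1 then m.set i ((m.getD i []).set (i + 1) (pvA AMat i)) else m) := by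
    funext m j
    by_cases hj : j = i + 1
    · subst hj; simp [pvA]
    · simp [hj]
  rw [hfun, h, pvF]
  simp [List.mem_range, pvA]

theorem pvF_length (AMat : List (List Int)) (mat : List (List Int)) (i : ℕ) :
    (pvF AMat mat i).length = mat.length := by
  unfold pvF; split_ifs <;> simp

theorem pv_foldl_F_length (AMat : List (List Int)) :
    ∀ (l : List ℕ) (mat : List (List Int)),
      (l.foldl (pvF AMat) mat).length = mat.length := by
  intro l
  induction l with
  | nil => intro mat; rfl
  | cons x t ih => intro mat; simp [List.foldl_cons, ih, pvF_length]

-- Row-wise characterisation of the outer fold: each index of l (occurring once,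
-- in range) gets its row set at position i+1; other rows are untouched.
theorem pv_outer_fold (AMat : List (List Int)) :
    ∀ (l : List ℕ), l.Nodup → ∀ (mat : List (List Int)), mat.length = AMat.length →
      ∀ j : ℕ,
        (l.foldl (pvF AMat) mat).getD j []
          = if j ∈ l ∧ j + 1 < AMat.length
            then (mat.getD j []).set (j + 1) (pvA AMat j)
            else mat.getD j [] := by
  intro l hl
  induction l with
  | nil => intro mat _ j; simp
  | cons x t ih =>
    intro mat hlen j
    rcases List.nodup_cons.mp hl with ⟨hx, ht⟩
    have hlen' : (pvF AMat mat x).length = AMat.length := by rw [pvF_length, hlen]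
    have hstep := ih ht (pvF AMat mat x) hlen' j
    simp only [List.foldl_cons]
    rw [hstep]
    by_cases hjx : j = x
    · subst hjx
      have hjt : j ∉ t := hx
      by_cases hjn : j + 1 < AMat.length
      · have hjlt : j < mat.length := by omega
        have hset : (pvF AMat mat j).getD j [] = (mat.getD j []).set (j + 1) (pvA AMat j) := by
          unfold pvF
          rw [if_pos hjn]
          simp [List.getD_eq_getElem?_getD, hjlt]
        rw [if_neg (fun hc => hjt hc.1), hset, if_pos ⟨List.mem_cons_self, hjn⟩]
      · have hid : pvF AMat mat j = mat := by unfold pvF; rw [if_neg hjn]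
        rw [if_neg (fun hc => hjt hc.1), hid, if_neg (fun hc => hjn hc.2)]
    · have hget : (pvF AMat mat x).getD j [] = mat.getD j [] := by
        unfold pvF
        split_ifs with h
        · simp [List.getD_eq_getElem?_getD, List.getElem?_set_ne (Ne.symm hjx)]
        · rfl
      rw [hget]
      by_cases hjt : j ∈ t
      · simp [hjt, List.mem_cons]
      · simp [hjt, hjx, List.mem_cons]

-- B's fold-with-append is the map of the row builder.
theorem pv_foldl_append {α β : Type} (f : α → β) :
    ∀ (l : List α) (acc : List β),
      l.foldl (fun rows i => rows ++ [f i]) acc = acc ++ l.map f := by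
  intro l
  induction l with
  | nil => intro acc; simp
  | cons x t ih => intro acc; simp [List.foldl_cons, ih]

-- Setting one entry of an all-zero row yields the concatenated form B builds.
theorem pv_set_replicate (n k : ℕ) (v : Int) (h : k < n) :
    (List.replicate n (0 : Int)).set k v
      = List.replicate k 0 ++ [v] ++ List.replicate (n - k - 1) 0 := by
  rw [List.set_eq_take_append_cons_drop, if_pos (by simpa using h)]
  simp only [List.take_replicate, List.drop_replicate, Nat.min_eq_left (Nat.le_of_lt h),
    List.append_assoc, List.singleton_append]
  congr 2

theorem UMat_eq_alt (AMat : List (List Int)) : UMat AMat = UMat_alt AMat := by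
  set n := AMat.length with hn
  have hB : UMat_alt AMat = (List.range n).map (fun i =>
      if i + 1 < n then
        List.replicate (i + 1) (0 : Int) ++ [pvA AMat i] ++ List.replicate (n - i - 2) 0
      else List.replicate n 0) := by
    unfold UMat_alt
    rw [pv_foldl_append]
    simp [pvA, hn]
  have hA : UMat AMat = (List.range n).foldl (pvF AMat)
      ((List.range n).map (fun _ => List.replicate n (0 : Int))) := by
    unfold UMat
    congr 1
    funext mat i
    exact pv_inner_fold AMat mat i
  have hlen0 : ((List.range n).map (fun _ => List.replicate n (0 : Int))).length = n := by simp
  have hAlen : (UMat AMat).length = n := by rw [hA, pv_foldl_F_length, hlen0]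
  have hBlen : (UMat_alt AMat).length = n := by rw [hB]; simp
  apply List.ext_getElem (by rw [hAlen, hBlen])
  intro j hj hj'
  have hjn : j < n := by rwa [hAlen] at hj
  have hmat0 : ((List.range n).map (fun _ => List.replicate n (0 : Int))).getD j []
      = List.replicate n (0 : Int) := by
    rw [List.getD_eq_getElem?_getD, List.getElem?_map]
    simp [hjn]
  have hrow := pv_outer_fold AMat (List.range n) List.nodup_range
    ((List.range n).map (fun _ => List.replicate n (0 : Int))) hlen0 j
  have hAj : (UMat AMat)[j] = (UMat AMat).getD j [] := by
    rw [List.getD_eq_getElem?_getD, List.getElem?_eq_getElem hj]; rfl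
  have hBj : (UMat_alt AMat)[j]'hj' = (UMat_alt AMat).getD j [] := by
    rw [List.getD_eq_getElem?_getD, List.getElem?_eq_getElem hj']; rfl
  rw [hAj, hBj, hA, hrow, hmat0, hB]
  rw [List.getD_eq_getElem?_getD, List.getElem?_map]
  simp only [List.getElem?_range, hjn, Option.map_some, Option.getD_some,
    List.mem_range, true_and]
  rw [← hn]
  by_cases hc : j + 1 < n
  · rw [if_pos hc, if_pos hc, pv_set_replicate n (j + 1) (pvA AMat j) hc]
    have harith : n - (j + 1) - 1 = n - j - 2 := by omega
    rw [harith]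
  · rw [if_neg hc, if_neg hc]

-- ===== VERDICT (by name: the statement is the Claim_ definition above) =====
theorem UMat_spec : Claim_equal_UMat := by
  intro AMat _ _
  unfold Spec_UMat
  exact UMat_eq_alt AMat
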